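-- pv_equiv track=rewrite | github.com/denlustgarten/GeekBrains | algorithm/lesson_4/task1.py | dig_count_0
-- ===== SOURCE A (Python) =====
-- def dig_count_0(sequence, find_dig, left_border=0, count=0):
--     if left_border != len(sequence):
--         num = abs(sequence[left_border])
--         while num > 0:
--             dig = num % 10
--             num //= 10
--             if dig == find_dig:
--                 count += 1
--         return dig_count_0(sequence, find_dig, left_border + 1, count)
--     else:
--         return count
-- ===== SOURCE B (Python) =====
-- def _digit_count(n, find_dig):
--     if n == 0:
--         return 0
--     return (1 if n % 10 == find_dig else 0) + _digit_count(n // 10, find_dig)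
--
--
-- def dig_count_0(sequence, find_dig, left_border=0, count=0):
--     return count + sum(_digit_count(abs(sequence[i]), find_dig)
--                       for i in range(left_border, len(sequence)))
-- ===== Notes on version B (the rewrite author's own statement) =====
-- stated objective: alternative
-- what changed: Replaces the tail recursion over the list index with threaded count by a sum of independent per-element digit counts over range(left_border, len), the inner while-loop digit extraction becoming a recursive helper.
import Mathlib
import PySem

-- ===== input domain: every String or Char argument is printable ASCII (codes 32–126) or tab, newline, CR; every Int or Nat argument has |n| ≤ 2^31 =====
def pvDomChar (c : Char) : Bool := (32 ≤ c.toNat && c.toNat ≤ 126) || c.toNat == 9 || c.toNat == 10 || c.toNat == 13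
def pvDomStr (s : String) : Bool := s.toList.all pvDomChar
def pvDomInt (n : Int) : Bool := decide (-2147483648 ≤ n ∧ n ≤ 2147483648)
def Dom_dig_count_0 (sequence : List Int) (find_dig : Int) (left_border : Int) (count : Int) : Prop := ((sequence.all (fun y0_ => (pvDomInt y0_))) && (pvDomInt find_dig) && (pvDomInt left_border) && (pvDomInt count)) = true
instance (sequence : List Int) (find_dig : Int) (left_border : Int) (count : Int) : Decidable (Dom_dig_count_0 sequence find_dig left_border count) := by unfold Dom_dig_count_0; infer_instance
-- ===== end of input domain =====

-- B replaces A's index recursion with threaded accumulator by a sum of independent per-element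
-- recursive digit counts over the index range (objective: alternative decomposition, same cost).

-- ===== PORT A =====
-- inner `while num > 0` loop of A; num = abs(...) so num ≥ 0 at every call
def digWhileA (find_dig : Int) (num : Int) (count : Int) : Int :=
  if h : 0 < num then
    digWhileA find_dig (PySem.Int.floordiv num 10)
      (if PySem.Int.mod num 10 = find_dig then count + 1 else count)
  else count
termination_by num.toNat
decreasing_by
  rw [PySem.Int.floordiv_eq_ediv_of_pos (by norm_num)]
  omega

-- Python tests `left_border != len(sequence)`; for left_border > len Python raises IndexError at
-- sequence[left_border] (outside Pre_), so the guard is written `<` to make the recursion total.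
def dig_count_0 (sequence : List Int) (find_dig : Int) (left_border : Int) (count : Int) : Int :=
  if left_border < (sequence.length : Int) then
    let num := |((PySem.List.pyGet? sequence left_border).getD 0)|
    dig_count_0 sequence find_dig (left_border + 1) (digWhileA find_dig num count)
  else count
termination_by ((sequence.length : Int) - left_border).toNat
decreasing_by omega

-- ===== PORT B =====
-- _digit_count of Source B; only ever called on abs(...), so it is ported on Nat (exact for n ≥ 0)
def digitCountB (n : Nat) (find_dig : Int) : Int :=
  if n = 0 then 0
  else (if ((n % 10 : Nat) : Int) = find_dig then 1 else 0) + digitCountB (n / 10) find_dig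

def dig_count_0_alt (sequence : List Int) (find_dig : Int) (left_border : Int) (count : Int) : Int :=
  count + ((PySem.List.pyRange left_border sequence.length 1).map
    (fun i => digitCountB ((PySem.List.pyGet? sequence i).getD 0).natAbs find_dig)).sum

-- ===== PRECONDITION & SPEC =====
-- Pre_ excludes exactly the inputs where a program raises IndexError: A raises for
-- left_border > len or left_border < -len; B raises for left_border < -len.
def Pre_dig_count_0 (sequence : List Int) (find_dig : Int) (left_border : Int) (count : Int) : Prop :=
  -(sequence.length : Int) ≤ left_border ∧ left_border ≤ sequence.length
instance (sequence : List Int) (find_dig : Int) (left_border : Int) (count : Int) : Decidable (Pre_dig_count_0 sequence find_dig left_border count) := by unfold Pre_dig_count_0; infer_instance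

def pvWitness_dig_count_0 : List Int × Int × Int × Int := ([12, -305, 7], 0, 0, 0)

def Spec_dig_count_0 (sequence : List Int) (find_dig : Int) (left_border : Int) (count : Int) (out : Int) : Prop := out = dig_count_0_alt sequence find_dig left_border count
instance (sequence : List Int) (find_dig : Int) (left_border : Int) (count : Int) (out : Int) : Decidable (Spec_dig_count_0 sequence find_dig left_border count out) := by unfold Spec_dig_count_0; infer_instance

-- ===== CLAIM (what is proved, stated in full; the proofs are below) =====
def Claim_equal_dig_count_0 : Prop := ∀ (sequence : List Int) (find_dig : Int) (left_border : Int) (count : Int), Dom_dig_count_0 sequence find_dig left_border count → Pre_dig_count_0 sequence find_dig left_border count → Spec_dig_count_0 sequence find_dig left_border count (dig_count_0 sequence find_dig left_border count)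


-- ===== LEMMAS AND PROOFS =====

-- A's while loop equals count + B's per-number digit count
theorem digWhileA_eq (find_dig : Int) : ∀ (n : Nat) (c : Int),
    digWhileA find_dig (n : Int) c = c + digitCountB n find_dig := by
  intro n
  induction n using Nat.strong_induction_on with
  | _ n ih =>
    intro c
    rw [digWhileA, digitCountB]
    by_cases h0 : n = 0
    · simp [h0]
    · have hpos : 0 < (n : Int) := by exact_mod_cast Nat.pos_of_ne_zero h0
      rw [dif_pos hpos]
      have hd : PySem.Int.floordiv (n:Int) 10 = ((n/10 : Nat) : Int) := by
        exact_mod_cast PySem.Int.floordiv_natCast n 10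
      have hm : PySem.Int.mod (n:Int) 10 = ((n%10 : Nat) : Int) := by
        exact_mod_cast PySem.Int.mod_natCast n 10
      rw [hd, hm]
      rw [ih (n / 10) (Nat.div_lt_self (Nat.pos_of_ne_zero h0) (by norm_num))]
      rw [if_neg h0]
      split_ifs <;> ring

theorem dig_count_0_eq (sequence : List Int) (find_dig : Int) : ∀ (fuel : Nat) (left_border count : Int),
    fuel = ((sequence.length : Int) - left_border).toNat →
    -(sequence.length : Int) ≤ left_border →
    dig_count_0 sequence find_dig left_border count = dig_count_0_alt sequence find_dig left_border count := by
  intro fuel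
  induction fuel with
  | zero =>
    intro lb c hf hlo
    have hge : (sequence.length : Int) ≤ lb := by omega
    rw [dig_count_0, if_neg (by omega)]
    unfold dig_count_0_alt
    rw [PySem.List.pyRange_one]
    have : ((sequence.length : Int) - lb).toNat = 0 := by omega
    simp [this]
  | succ m ih =>
    intro lb c hf hlo
    have hlt : lb < (sequence.length : Int) := by omega
    rw [dig_count_0, if_pos hlt]
    rw [ih (lb + 1) _ (by omega) (by omega)]
    unfold dig_count_0_alt
    conv_rhs => rw [PySem.List.pyRange_one_cons (by omega), List.map_cons, List.sum_cons]
    rw [Int.abs_eq_natAbs, digWhileA_eq]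
    ring

-- ===== VERDICT (by name: the statement is the Claim_ definition above) =====
theorem dig_count_0_spec : Claim_equal_dig_count_0 := by
  intro sequence find_dig left_border count _ hpre
  unfold Spec_dig_count_0
  exact dig_count_0_eq sequence find_dig _ left_border count rfl hpre.1
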